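-- pv_equiv track=rewrite | github.com/chanzuckerberg/czid-pipeline | idseq_pipeline/commands/common.py | fill_missing_calls
-- ===== SOURCE A (Python) =====
-- INVALID_CALL_BASE_ID = -(10**8)
--
-- def fill_missing_calls(cleaned_lineage):
--     """Replace missing calls with virtual taxids as shown in
--     fill_missing_calls_tests. Replaces the negative call IDs with a
--     calculated negative value that embeds the next higher positive call in it
--     to indicate (1) the call is non-specific (negative/artificial) and (2)
--     there is a positive specific call above it on the taxonomy tree.
--
--     Ex: with species_id, genus_id, family_id
--     (55, -200, 1534) => (55, -200001534, 1534)
--     (-100, 5888, -300) => (-100005888, 5888, -300)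
--     """
--     result = list(cleaned_lineage)
--     tax_level = len(cleaned_lineage)
--     closest_real_hit_just_above_me = -1
--
--     def blank(taxid_int):
--         return 0 > taxid_int > INVALID_CALL_BASE_ID
--
--     while tax_level > 0:
--         me = int(cleaned_lineage[tax_level - 1])
--         if me >= 0:
--             closest_real_hit_just_above_me = me
--         elif closest_real_hit_just_above_me >= 0 and blank(me):
--             result[tax_level - 1] = str(tax_level * INVALID_CALL_BASE_ID -
--                                         closest_real_hit_just_above_me)
--         tax_level -= 1
--     return result
-- ===== SOURCE B (Python) =====
-- INVALID_CALL_BASE_ID = -(10**8)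
--
--
-- def _nearest_above(lineage):
--     """Return (closest non-negative int in lineage or -1,
--     table with table[i] = closest non-negative int at an index > i, or -1)."""
--     if not lineage:
--         return -1, []
--     closest, tail = _nearest_above(lineage[1:])
--     x = int(lineage[0])
--     return (x if x >= 0 else closest), [closest] + tail
--
--
-- def fill_missing_calls(cleaned_lineage):
--     _, table = _nearest_above(cleaned_lineage)
--     return [str((i + 1) * INVALID_CALL_BASE_ID - na)
--             if (INVALID_CALL_BASE_ID < int(v) < 0 and na >= 0) else v
--             for i, (v, na) in enumerate(zip(cleaned_lineage, table))]
-- ===== Notes on version B (the rewrite author's own statement) =====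
-- stated objective: alternative
-- what changed: Replaces A's single stateful backward while-loop with in-place updates by a table-then-map decomposition: one pass builds a nearest-non-negative-call-above table, a separate forward comprehension emits each output element from the original value and its table entry.
import Mathlib
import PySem

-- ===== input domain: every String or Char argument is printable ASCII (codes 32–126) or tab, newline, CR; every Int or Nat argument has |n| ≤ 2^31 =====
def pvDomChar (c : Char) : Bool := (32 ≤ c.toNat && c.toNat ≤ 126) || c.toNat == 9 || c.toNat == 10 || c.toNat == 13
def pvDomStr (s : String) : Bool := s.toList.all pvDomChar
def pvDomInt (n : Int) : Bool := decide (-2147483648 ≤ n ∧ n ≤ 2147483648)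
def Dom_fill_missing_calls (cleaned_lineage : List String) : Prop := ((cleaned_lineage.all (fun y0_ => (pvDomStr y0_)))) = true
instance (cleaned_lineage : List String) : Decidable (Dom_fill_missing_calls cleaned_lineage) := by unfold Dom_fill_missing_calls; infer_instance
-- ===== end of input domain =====

-- B restructures A's single backward stateful pass as a nearest-call table built once
-- plus an independent forward emission pass (objective: alternative decomposition).

def pvBase : Int := -(10 ^ 8)

-- int(s); Pre_ guarantees the parse succeeds, the default is never used inside Pre_
def pvInt (s : String) : Int := (PySem.Int.ofStr? s).getD 0

-- ===== PORT A =====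
def fillLoop (l : List String) : Nat → List String → Int → List String
  | 0, res, _ => res
  | k + 1, res, closest =>
    let me := pvInt (l.getD k "")
    if me ≥ 0 then
      fillLoop l k res me
    else if closest ≥ 0 ∧ (0 > me ∧ pvBase < me) then
      fillLoop l k (res.set k (PySem.Int.toStr (((k : Int) + 1) * pvBase - closest))) closest
    else
      fillLoop l k res closest

def fill_missing_calls (cleaned_lineage : List String) : List String :=
  fillLoop cleaned_lineage cleaned_lineage.length cleaned_lineage (-1)

-- ===== PORT B =====
-- _nearest_above: (closest non-negative call in the list or -1, the per-index table)
def nearestAbove : List String → Int × List Int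
  | [] => (-1, [])
  | v :: rest =>
    let p := nearestAbove rest
    let x := pvInt v
    ((if x ≥ 0 then x else p.1), p.1 :: p.2)

-- the enumerate/zip comprehension
def fillEmit : Nat → List String → List Int → List String
  | _, [], _ => []
  | _, _ :: _, [] => []
  | i, v :: vs, c :: cs =>
    (if pvBase < pvInt v ∧ pvInt v < 0 ∧ c ≥ 0 then
        PySem.Int.toStr (((i : Int) + 1) * pvBase - c)
      else v) :: fillEmit (i + 1) vs cs

def fill_missing_calls_alt (cleaned_lineage : List String) : List String :=
  fillEmit 0 cleaned_lineage (nearestAbove cleaned_lineage).2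

-- ===== PRECONDITION & SPEC =====
-- Pre_ excludes exactly the inputs where int(v) raises ValueError in both programs.
def Pre_fill_missing_calls (cleaned_lineage : List String) : Prop :=
  ∀ s ∈ cleaned_lineage, (PySem.Int.ofStr? s).isSome = true
instance (cleaned_lineage : List String) : Decidable (Pre_fill_missing_calls cleaned_lineage) := by
  unfold Pre_fill_missing_calls; infer_instance

def pvWitness_fill_missing_calls : List String := ["55", "-200", "1534"]

def Spec_fill_missing_calls (cleaned_lineage : List String) (out : List String) : Prop := out = fill_missing_calls_alt cleaned_lineage
instance (cleaned_lineage : List String) (out : List String) : Decidable (Spec_fill_missing_calls cleaned_lineage out) := by unfold Spec_fill_missing_calls; infer_instance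

-- ===== CLAIM (what is proved, stated in full; the proofs are below) =====
def Claim_equal_fill_missing_calls : Prop := ∀ (cleaned_lineage : List String), Dom_fill_missing_calls cleaned_lineage → Pre_fill_missing_calls cleaned_lineage → Spec_fill_missing_calls cleaned_lineage (fill_missing_calls cleaned_lineage)

-- ===== LEMMAS AND PROOFS =====

-- common right-to-left recursion: (outputs for a suffix starting at position i with
-- incoming closest-above c, closest seen after processing the whole suffix)
def pvH : List String → Nat → Int → List String × Int
  | [], _, c => ([], c)
  | v :: rest, i, c =>
    let p := pvH rest (i + 1) c
    let me := pvInt v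
    if me ≥ 0 then (v :: p.1, me)
    else if p.2 ≥ 0 ∧ (0 > me ∧ pvBase < me) then
      (PySem.Int.toStr (((i : Int) + 1) * pvBase - p.2) :: p.1, p.2)
    else (v :: p.1, p.2)

theorem pvH_snd_eq_nearest (l : List String) (i : Nat) :
    (pvH l i (-1)).2 = (nearestAbove l).1 := by
  induction l generalizing i with
  | nil => simp [pvH, nearestAbove]
  | cons v rest ih =>
    simp only [pvH, nearestAbove]
    rw [ih (i + 1)]
    split_ifs with h1 h2 <;> simp_all

theorem emit_eq_pvH (l : List String) (i : Nat) :
    fillEmit i l (nearestAbove l).2 = (pvH l i (-1)).1 := by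
  induction l generalizing i with
  | nil => simp [fillEmit, pvH]
  | cons v rest ih =>
    simp only [fillEmit, pvH, nearestAbove]
    rw [ih (i + 1), pvH_snd_eq_nearest]
    set c := (nearestAbove rest).1 with hc
    set me := pvInt v with hme
    by_cases h0 : me ≥ 0
    · simp only [if_pos h0]
      have : ¬ (pvBase < me ∧ me < 0 ∧ c ≥ 0) := by rintro ⟨_, h, _⟩; omega
      simp [this]
    · simp only [if_neg h0]
      by_cases h1 : c ≥ 0 ∧ (0 > me ∧ pvBase < me)
      · simp [h1]
      · have : ¬ (pvBase < me ∧ me < 0 ∧ c ≥ 0) := by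
          rintro ⟨ha, hb, hcc⟩; exact h1 ⟨hcc, hb, ha⟩
        simp [h1, this]

theorem pvH_snoc (xs : List String) (v : String) (i : Nat) (c : Int) :
    pvH (xs ++ [v]) i c =
      ((pvH xs i (if pvInt v ≥ 0 then pvInt v else c)).1 ++
        [if pvInt v ≥ 0 then v
         else if c ≥ 0 ∧ (0 > pvInt v ∧ pvBase < pvInt v) then
           PySem.Int.toStr (((i : Int) + (xs.length : Int) + 1) * pvBase - c)
         else v],
       (pvH xs i (if pvInt v ≥ 0 then pvInt v else c)).2) := by
  induction xs generalizing i with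
  | nil =>
    simp only [List.nil_append, pvH, List.length_nil]
    set me := pvInt v with hme
    by_cases h0 : me ≥ 0
    · simp [h0]
    · simp only [if_neg h0]
      by_cases h1 : c ≥ 0 ∧ (0 > me ∧ pvBase < me)
      · simp [h1]
      · simp [h1]
  | cons x xs ih =>
    simp only [List.cons_append, pvH, List.length_cons]
    rw [ih (i + 1)]
    set q := pvH xs (i + 1) (if pvInt v ≥ 0 then pvInt v else c) with hq
    have harg : (((i + 1 : Nat) : Int) + (xs.length : Int) + 1) = ((i : Int) + ((xs.length + 1 : Nat) : Int) + 1) := by push_cast; ring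
    rw [harg]
    set w := (if pvInt v ≥ 0 then v
         else if c ≥ 0 ∧ (0 > pvInt v ∧ pvBase < pvInt v) then
           PySem.Int.toStr (((i : Int) + ((xs.length : Int) + 1) + 1) * pvBase - c)
         else v) with hw
    set me := pvInt x with hme
    split_ifs <;> simp

theorem fillLoop_eq_pvH (l : List String) (k : Nat) (res : List String) (c : Int)
    (hk : k ≤ l.length) (hlen : res.length = l.length) (htake : l.take k = res.take k) :
    fillLoop l k res c = (pvH (l.take k) 0 c).1 ++ res.drop k := by
  induction k generalizing res c with
  | zero => simp [fillLoop, pvH]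
  | succ k ih =>
    have hkl : k < l.length := by omega
    have hkr : k < res.length := by omega
    have hgetD : l.getD k "" = l[k] := List.getD_eq_getElem l "" hkl
    have htk : l.take (k + 1) = l.take k ++ [l[k]] := by
      rw [List.take_add_one]; simp [hkl]
    have htake' : l.take k = res.take k := by
      have h1 : (l.take (k+1)).take k = (res.take (k+1)).take k := by rw [htake]
      simpa [List.take_take, Nat.min_def, Nat.le_of_lt (Nat.lt_succ_self k)] using h1
    have hresk : res[k] = l[k] := by
      have h1 : (l.take (k+1))[k]'(by simp [hkl]) = (res.take (k+1))[k]'(by simp [hkr]) := by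
        simp only [htake]
      simpa using h1.symm
    have hdrop : res.drop k = res[k] :: res.drop (k + 1) := List.drop_eq_getElem_cons hkr
    have hlenk : (l.take k).length = k := by simp [Nat.le_of_lt hkl]
    simp only [fillLoop, hgetD]
    set me := pvInt l[k] with hme
    by_cases h0 : me ≥ 0
    · rw [if_pos h0, ih res me (by omega) hlen htake', htk, pvH_snoc]
      simp only [hlenk]
      rw [hdrop, hresk]
      simp [← hme, h0]
    · rw [if_neg h0]
      by_cases h1 : c ≥ 0 ∧ (0 > me ∧ pvBase < me)
      · rw [if_pos h1]
        set w := PySem.Int.toStr (((k : Int) + 1) * pvBase - c) with hwdef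
        have hlen' : (res.set k w).length = l.length := by simp [hlen]
        have htake'' : l.take k = (res.set k w).take k := by
          rw [htake', List.take_set_of_le]; omega
        rw [ih (res.set k w) c (by omega) hlen' htake'', htk, pvH_snoc]
        simp only [hlenk]
        rw [← hme, if_neg h0, if_pos h1]
        have hdrop' : (res.set k w).drop k = w :: res.drop (k + 1) := by
          rw [List.drop_eq_getElem_cons (by omega : k < (res.set k w).length)]
          rw [List.getElem_set_self]
          congr 1
          rw [List.drop_set]
          simp
        rw [hdrop']
        simp [h0, hwdef]
      · rw [if_neg h1, ih res c (by omega) hlen htake', htk, pvH_snoc]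
        simp only [hlenk]
        rw [hdrop, hresk]
        simp [← hme, h0, h1]

-- ===== VERDICT (by name: the statement is the Claim_ definition above) =====
theorem fill_missing_calls_spec : Claim_equal_fill_missing_calls := by
  intro l _ _
  unfold Spec_fill_missing_calls fill_missing_calls fill_missing_calls_alt
  rw [fillLoop_eq_pvH l l.length l (-1) le_rfl rfl rfl, emit_eq_pvH]
  simp
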